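-- pv_equiv track=rewrite | github.com/LiangLiheng/LeetCodePro | 3310.remove-methods-from-project.py | remainingMethods
-- ===== SOURCE A (Python) =====
-- from typing import List
--
-- def remainingMethods(n: int, k: int, invocations: List[List[int]]) -> List[int]:
--     adj = [[] for _ in range(n)]
--     rev_adj = [[] for _ in range(n)]
--     for a, b in invocations:
--         adj[a].append(b)
--         rev_adj[b].append(a)
--     # Find suspicious: reachable from k
--     vis = [False] * n
--     suspicious = set()
--     stack = [k]
--     vis[k] = True
--     suspicious.add(k)
--     while stack:
--         u = stack.pop()
--         for v in adj[u]:
--             if not vis[v]: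
--                 vis[v] = True
--                 suspicious.add(v)
--                 stack.append(v)
--     # Check if removable
--     can_remove = True
--     for s in suspicious:
--         for c in rev_adj[s]:
--             if c not in suspicious:
--                 can_remove = False
--                 break
--         if not can_remove:
--             break
--     if can_remove:
--         res = [i for i in range(n) if i not in suspicious]
--     else:
--         res = list(range(n))
--     return sorted(res)
-- ===== SOURCE B (Python) =====
-- def remainingMethods(n, k, invocations):
--     # forward adjacency only: no reverse index, no visited array, no final sort
--     adj = [[] for _ in range(n)]
--     for a, b in invocations:
--         adj[a].append(b)
--     suspicious = {k}
--     stack = [k]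
--     while stack:
--         u = stack.pop()
--         for v in adj[u]:
--             if v not in suspicious:
--                 suspicious.add(v)
--                 stack.append(v)
--     if all(a in suspicious for a, b in invocations if b in suspicious):
--         return [i for i in range(n) if i not in suspicious]
--     return list(range(n))
-- ===== Notes on version B (the rewrite author's own statement) =====
-- stated objective: simpler
-- what changed: B drops the reverse adjacency index, the visited array and the per-suspicious-node predecessor scan of A: it builds only the forward adjacency, walks reachability using the suspicious set itself as the visited structure, decides removability with one direct pass over invocations (an edge (a,b) with b suspicious and a not blocks removal), and emits the result already sorted instead of calling sorted.
-- outside the precondition, e.g. on remainingMethods(5, 4, [[-5, -2], [-5, 3], [-3, -1]]): A returns [0, 1, 2, 3, 4], B returns [0, 1, 2, 3]; on remainingMethods(3, -2, [[2, -3], [-3, 1], [-3, -1]]): A returns [0, 1, 2], B returns [0, 1, 2]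
import Mathlib
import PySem

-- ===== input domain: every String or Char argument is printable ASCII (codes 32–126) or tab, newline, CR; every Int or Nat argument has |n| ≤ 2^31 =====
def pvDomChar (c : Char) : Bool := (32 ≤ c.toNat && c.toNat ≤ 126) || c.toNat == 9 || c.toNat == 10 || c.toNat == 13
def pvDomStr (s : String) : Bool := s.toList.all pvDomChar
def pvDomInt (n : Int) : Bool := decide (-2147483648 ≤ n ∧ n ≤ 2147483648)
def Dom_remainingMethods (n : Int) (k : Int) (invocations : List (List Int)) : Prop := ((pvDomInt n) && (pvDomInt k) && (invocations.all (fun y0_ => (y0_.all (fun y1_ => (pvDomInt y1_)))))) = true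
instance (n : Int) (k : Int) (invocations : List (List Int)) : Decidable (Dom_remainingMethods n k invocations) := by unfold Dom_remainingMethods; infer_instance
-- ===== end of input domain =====

-- B is simpler, not faster: it drops A's reverse index rev_adj, the vis array and the per-suspicious-node
-- predecessor scan, keeping only a forward adjacency dict, the suspicious set as its own visited structure,
-- and one direct pass over invocations to decide removability; the result is emitted already sorted.

-- ===== PORT A =====

-- adj[i].append(x) on a Python list of lists (negative i wraps; out of range Python raises, pySetD/pyGetD leave the table)
def pvRowApp (tbl : List (List Int)) (i : Int) (x : Int) : List (List Int) :=
  PySem.List.pySetD tbl i (PySem.List.pyGetD tbl i [] ++ [x])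

-- one invocation row of A's build loop, adj side: 'adj[a].append(b)'
def pvStepAdj (tbl : List (List Int)) (p : List Int) : List (List Int) :=
  match p with
  | [a, b] => pvRowApp tbl a b
  | _ => tbl

-- rev side: 'rev_adj[b].append(a)'
def pvStepRev (tbl : List (List Int)) (p : List Int) : List (List Int) :=
  match p with
  | [a, b] => pvRowApp tbl b a
  | _ => tbl

-- the inner 'for v in adj[u]' body of A's while loop: state (vis, suspicious, stack)
def pvStepA (t : List Bool × PySem.Set Int × List Int) (v : Int) : List Bool × PySem.Set Int × List Int :=
  if PySem.List.pyGetD t.1 v true = false then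
    (PySem.List.pySetD t.1 v true, PySem.Set.add t.2.1 v, v :: t.2.2)
  else t

theorem pyGetD_false_elim (xs : List Bool) (i : Int) (h : PySem.List.pyGetD xs i true = false) :
    ∃ kn : Nat, kn < xs.length ∧ xs[kn]? = some false ∧ PySem.List.pySetD xs i true = xs.set kn true := by
  rw [PySem.List.pyGetD] at h
  rcases hg : PySem.List.pyGet? xs i with _ | b
  · rw [hg] at h; simp at h
  · rw [hg] at h; simp at h; subst h
    rw [PySem.List.pyGet?] at hg
    rcases hi : PySem.List.pyIdx? xs.length i with _ | kn
    · rw [hi] at hg; simp at hg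
    · rw [hi] at hg; simp at hg
      obtain ⟨hlt, _⟩ := List.getElem?_eq_some_iff.mp hg
      exact ⟨kn, hlt, hg, by rw [PySem.List.pySetD, PySem.List.pySet?, hi]; rfl⟩

theorem pvStepA_meas (l : List Int) (t : List Bool × PySem.Set Int × List Int) :
    (l.foldl pvStepA t).1.count false + (l.foldl pvStepA t).2.2.length
      = t.1.count false + t.2.2.length := by
  induction l generalizing t with
  | nil => rfl
  | cons v rest ih =>
      simp only [List.foldl_cons]
      rw [ih]
      unfold pvStepA
      split
      · rename_i h
        obtain ⟨kn, hlt, hget, hset⟩ := pyGetD_false_elim t.1 v h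
        have hv : t.1[kn] = false := (List.getElem?_eq_some_iff.mp hget).2
        have hc := List.count_set (a := true) (b := false) (l := t.1) (i := kn) hlt
        have hpos : 0 < t.1.count false := by
          apply List.count_pos_iff.mpr
          rw [← hv]; exact List.getElem_mem hlt
        simp only [hset, hc, hv]
        simp
        omega
      · rfl

def pvDfsA (adj : List (List Int)) (vis : List Bool) (susp : PySem.Set Int) (stack : List Int) :
    List Bool × PySem.Set Int :=
  match stack with
  | [] => (vis, susp)
  | u :: st =>
      pvDfsA adj ((PySem.List.pyGetD adj u []).foldl pvStepA (vis, susp, st)).1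
        ((PySem.List.pyGetD adj u []).foldl pvStepA (vis, susp, st)).2.1
        ((PySem.List.pyGetD adj u []).foldl pvStepA (vis, susp, st)).2.2
termination_by vis.count false + stack.length
decreasing_by
  have := pvStepA_meas (PySem.List.pyGetD adj u []) (vis, susp, st)
  simp only [List.length_cons] at this ⊢
  omega

def remainingMethods (n : Int) (k : Int) (invocations : List (List Int)) : List Int :=
  let init : List (List Int) := (PySem.List.pyRange 0 n 1).map (fun _ => [])
  let tbls := invocations.foldl (fun (t : List (List Int) × List (List Int)) p =>
      (pvStepAdj t.1 p, pvStepRev t.2 p)) (init, init)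
  let adj := tbls.1
  let revAdj := tbls.2
  let vis0 := List.replicate n.toNat false
  let vis1 := PySem.List.pySetD vis0 k true
  let susp0 : PySem.Set Int := PySem.Set.add PySem.Set.empty k
  let susp := (pvDfsA adj vis1 susp0 [k]).2
  -- the for/break pair computes exactly the boolean 'every predecessor of every suspicious node is suspicious'
  let canRemove := susp.all (fun s => (PySem.List.pyGetD revAdj s []).all (fun c => PySem.Set.contains susp c))
  let res := if canRemove then (PySem.List.pyRange 0 n 1).filter (fun i => !PySem.Set.contains susp i)
             else PySem.List.pyRange 0 n 1
  PySem.List.sorted res (fun x => x) false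

-- ===== PORT B =====

-- 'adj[a].append(b)' of B's single build loop
def pvStepB (tbl : List (List Int)) (p : List Int) : List (List Int) :=
  match p with
  | [a, b] => pvRowApp tbl a b
  | _ => tbl

-- the inner loop body of B's walk: state (suspicious, stack)
def pvPushB (t : PySem.Set Int × List Int) (v : Int) : PySem.Set Int × List Int :=
  if PySem.Set.contains t.1 v then t else (PySem.Set.add t.1 v, v :: t.2)

theorem contains_add_eq (s : PySem.Set Int) (v x : Int) (hc : PySem.Set.contains s v = false) :
    PySem.Set.contains (PySem.Set.add s v) x = (PySem.Set.contains s x || x == v) := by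
  simp only [PySem.Set.contains] at hc
  have hv : v ∉ s := by simpa using hc
  simp [PySem.Set.add, PySem.Set.contains, hv, List.mem_append]
  rfl

theorem filt_add (L : List Int) (hnd : L.Nodup) (s : PySem.Set Int) (v : Int) (hv : v ∈ L)
    (hc : PySem.Set.contains s v = false) :
    (L.filter (fun x => !PySem.Set.contains (PySem.Set.add s v) x)).length + 1
      = (L.filter (fun x => !PySem.Set.contains s x)).length := by
  have hrw : (fun x => !PySem.Set.contains (PySem.Set.add s v) x)
      = (fun x => !(PySem.Set.contains s x || x == v)) :=
    funext fun x => by rw [contains_add_eq s v x hc]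
  rw [hrw]
  induction L with
  | nil => cases hv
  | cons a L' ih =>
      have hnd' : L'.Nodup := hnd.of_cons
      by_cases hav : a = v
      · subst hav
        have hvn : a ∉ L' := (List.nodup_cons.mp hnd).1
        simp only [List.filter_cons, BEq.refl, Bool.or_true, Bool.not_true]
        rw [List.filter_congr (fun x hx => by
          have hxv : (x == a) = false := by
            simp only [beq_eq_false_iff_ne]
            intro h; exact hvn (h ▸ hx)
          rw [hxv, Bool.or_false])]
        rw [hc]
        simp
      · have hv' : v ∈ L' := by
          rcases List.mem_cons.mp hv with h | h
          · exact absurd h.symm hav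
          · exact h
        have ha : (a == v) = false := beq_eq_false_iff_ne.mpr hav
        simp only [List.filter_cons, ha, Bool.or_false]
        have := ih hnd' hv'
        split
        · simpa using this
        · exact this

theorem pvPushB_meas (pool : List Int) (l : List Int) (hl : ∀ v ∈ l, v ∈ pool)
    (t : PySem.Set Int × List Int) :
    ((PySem.List.dedup pool).filter (fun x => !PySem.Set.contains t.1 x)).length + t.2.length
      = ((PySem.List.dedup pool).filter (fun x => !PySem.Set.contains (l.foldl pvPushB t).1 x)).length
          + (l.foldl pvPushB t).2.length := by
  induction l generalizing t with
  | nil => rfl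
  | cons v rest ih =>
      simp only [List.foldl_cons]
      rw [← ih (fun w hw => hl w (List.mem_cons_of_mem v hw))]
      unfold pvPushB
      split
      · rfl
      · rename_i hc
        have hv : v ∈ PySem.List.dedup pool :=
          (PySem.List.mem_dedup pool v).mpr (hl v List.mem_cons_self)
        have := filt_add (PySem.List.dedup pool) (PySem.List.nodup_dedup pool) t.1 v hv
          (by simpa using hc)
        simp only [List.length_cons]
        omega

theorem row_mem_flatten (tbl : List (List Int)) (u : Int) :
    ∀ v ∈ PySem.List.pyGetD tbl u [], v ∈ tbl.flatten := by
  intro v hv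
  rw [PySem.List.pyGetD] at hv
  rcases hg : PySem.List.pyGet? tbl u with _ | row
  · rw [hg] at hv; cases hv
  · rw [hg] at hv
    exact List.mem_flatten.mpr ⟨row, PySem.List.mem_of_pyGet?_eq_some tbl hg, hv⟩

def pvDfsB (adj : List (List Int)) (susp : PySem.Set Int) (stack : List Int) : PySem.Set Int :=
  match stack with
  | [] => susp
  | u :: st =>
      pvDfsB adj ((PySem.List.pyGetD adj u []).foldl pvPushB (susp, st)).1
        ((PySem.List.pyGetD adj u []).foldl pvPushB (susp, st)).2
termination_by ((PySem.List.dedup adj.flatten).filter (fun x => !PySem.Set.contains susp x)).length + stack.length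
decreasing_by
  have := pvPushB_meas adj.flatten (PySem.List.pyGetD adj u []) (row_mem_flatten adj u) (susp, st)
  simp only [List.length_cons] at this ⊢
  omega

def remainingMethods_alt (n : Int) (k : Int) (invocations : List (List Int)) : List Int :=
  let adj := invocations.foldl pvStepB ((PySem.List.pyRange 0 n 1).map (fun _ => []))
  let susp := pvDfsB adj (PySem.Set.add PySem.Set.empty k) [k]
  let removable := invocations.all (fun p =>
      match p with
      | [a, b] => !PySem.Set.contains susp b || PySem.Set.contains susp a
      | _ => true)
  if removable then (PySem.List.pyRange 0 n 1).filter (fun i => !PySem.Set.contains susp i)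
  else PySem.List.pyRange 0 n 1

-- ===== PRECONDITION & SPEC =====

-- Pre_ keeps the natural domain: k in [0, n) and every invocation a pair of ids in [0, n).  Outside it A either
-- raises (id or k outside [-n, n), a row that is not a pair) or, for negative in-range ids, returns a value that
-- is an accident of Python's negative-index wraparound (mixing a node's negative and wrapped names).
def Pre_remainingMethods (n : Int) (k : Int) (invocations : List (List Int)) : Prop :=
  (0 ≤ k ∧ k < n) ∧ ∀ p ∈ invocations, p.length = 2 ∧ ∀ x ∈ p, 0 ≤ x ∧ x < n
instance (n : Int) (k : Int) (invocations : List (List Int)) : Decidable (Pre_remainingMethods n k invocations) := by unfold Pre_remainingMethods; infer_instance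

def pvWitness_remainingMethods : Int × Int × List (List Int) := (4, 0, [[0, 1], [1, 2], [3, 1]])

def Spec_remainingMethods (n : Int) (k : Int) (invocations : List (List Int)) (out : List Int) : Prop := out = remainingMethods_alt n k invocations
instance (n : Int) (k : Int) (invocations : List (List Int)) (out : List Int) : Decidable (Spec_remainingMethods n k invocations out) := by unfold Spec_remainingMethods; infer_instance

-- ===== CLAIM (what is proved, stated in full; the proofs are below) =====
def Claim_equal_remainingMethods : Prop := ∀ (n : Int) (k : Int) (invocations : List (List Int)), Dom_remainingMethods n k invocations → Pre_remainingMethods n k invocations → Spec_remainingMethods n k invocations (remainingMethods n k invocations)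
-- ===== LEMMAS AND PROOFS =====

-- p is a pair
theorem pair_shape (p : List Int) (h : p.length = 2) : ∃ a b : Int, p = [a, b] := by
  match p, h with
  | [a, b], _ => exact ⟨a, b, rfl⟩

-- the outgoing (resp. incoming) endpoint an invocation row contributes to node i's adjacency row
def pvOutOf (i : Int) (p : List Int) : Option Int :=
  match p with
  | [a, b] => if a = i then some b else none
  | _ => none

def pvInOf (i : Int) (p : List Int) : Option Int :=
  match p with
  | [a, b] => if b = i then some a else none
  | _ => none

theorem rowApp_get (tbl : List (List Int)) (a i x : Int) (ha : 0 ≤ a) (ha2 : a < (tbl.length : Int))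
    (hi : 0 ≤ i) (_hi2 : i < (tbl.length : Int)) :
    PySem.List.pyGetD (pvRowApp tbl a x) i []
      = if i = a then PySem.List.pyGetD tbl i [] ++ [x] else PySem.List.pyGetD tbl i [] := by
  have h1 : ((a.toNat : Nat) : Int) = a := Int.toNat_of_nonneg ha
  have h2 : ((i.toNat : Nat) : Int) = i := Int.toNat_of_nonneg hi
  rw [pvRowApp, ← h1, ← h2,
    PySem.List.pyGetD_pySetD_natCast tbl a.toNat i.toNat _ _ (by omega)]
  simp only [Nat.cast_inj]
  by_cases h : i = a
  · simp [h]
  · simp [show i.toNat ≠ a.toNat from by omega]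

theorem rowA (inv : List (List Int)) : ∀ tbl : List (List Int),
    (∀ p ∈ inv, ∃ a b : Int, p = [a, b] ∧ 0 ≤ a ∧ a < (tbl.length : Int)) →
    ∀ i : Int, 0 ≤ i → i < (tbl.length : Int) →
    PySem.List.pyGetD (inv.foldl pvStepAdj tbl) i []
      = PySem.List.pyGetD tbl i [] ++ inv.filterMap (pvOutOf i) := by
  induction inv with
  | nil => intro tbl _ i _ _; simp
  | cons p rest ih =>
      intro tbl hval i hi hi2
      obtain ⟨a, b, rfl, ha, ha2⟩ := hval _ List.mem_cons_self
      rw [List.foldl_cons, List.filterMap_cons]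
      have hstep : pvStepAdj tbl [a, b] = pvRowApp tbl a b := rfl
      have hlen : (pvRowApp tbl a b).length = tbl.length := by
        simp [pvRowApp, PySem.List.length_pySetD]
      rw [hstep, ih (pvRowApp tbl a b)
        (by intro q hq; obtain ⟨a', b', rfl, h1, h2⟩ := hval q (List.mem_cons_of_mem _ hq)
            exact ⟨a', b', rfl, h1, by rw [hlen]; exact h2⟩)
        i hi (by rw [hlen]; exact hi2)]
      rw [rowApp_get tbl a i b ha ha2 hi hi2]
      by_cases h : i = a
      · rw [if_pos h, show pvOutOf i [a, b] = some b from by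
          simp only [pvOutOf]; rw [if_pos h.symm]]
        simp
      · rw [if_neg h, show pvOutOf i [a, b] = none from by
          simp only [pvOutOf]; rw [if_neg (fun hc => h hc.symm)]]

theorem rowRev (inv : List (List Int)) : ∀ tbl : List (List Int),
    (∀ p ∈ inv, ∃ a b : Int, p = [a, b] ∧ 0 ≤ b ∧ b < (tbl.length : Int)) →
    ∀ i : Int, 0 ≤ i → i < (tbl.length : Int) →
    PySem.List.pyGetD (inv.foldl pvStepRev tbl) i []
      = PySem.List.pyGetD tbl i [] ++ inv.filterMap (pvInOf i) := by
  induction inv with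
  | nil => intro tbl _ i _ _; simp
  | cons p rest ih =>
      intro tbl hval i hi hi2
      obtain ⟨a, b, rfl, hb, hb2⟩ := hval _ List.mem_cons_self
      rw [List.foldl_cons, List.filterMap_cons]
      have hstep : pvStepRev tbl [a, b] = pvRowApp tbl b a := rfl
      have hlen : (pvRowApp tbl b a).length = tbl.length := by
        simp [pvRowApp, PySem.List.length_pySetD]
      rw [hstep, ih (pvRowApp tbl b a)
        (by intro q hq; obtain ⟨a', b', rfl, h1, h2⟩ := hval q (List.mem_cons_of_mem _ hq)
            exact ⟨a', b', rfl, h1, by rw [hlen]; exact h2⟩)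
        i hi (by rw [hlen]; exact hi2)]
      rw [rowApp_get tbl b i a hb hb2 hi hi2]
      by_cases h : i = b
      · rw [if_pos h, show pvInOf i [a, b] = some a from by
          simp only [pvInOf]; rw [if_pos h.symm]]
        simp
      · rw [if_neg h, show pvInOf i [a, b] = none from by
          simp only [pvInOf]; rw [if_neg (fun hc => h hc.symm)]]

-- one pass of the inner neighbour loop keeps the two walks in lockstep
theorem fold_agree (n : Int) (l : List Int) :
    ∀ (vis : List Bool) (susp : PySem.Set Int) (st : List Int),
    (∀ v ∈ l, 0 ≤ v ∧ v < n) →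
    vis.length = n.toNat →
    (∀ x : Int, 0 ≤ x → x < n → PySem.List.pyGetD vis x true = PySem.Set.contains susp x) →
    (∀ x ∈ susp, 0 ≤ x ∧ x < n) →
    (∀ x ∈ st, 0 ≤ x ∧ x < n) →
    (l.foldl pvStepA (vis, susp, st)).2.1 = (l.foldl pvPushB (susp, st)).1 ∧
    (l.foldl pvStepA (vis, susp, st)).2.2 = (l.foldl pvPushB (susp, st)).2 ∧
    (l.foldl pvStepA (vis, susp, st)).1.length = n.toNat ∧
    (∀ x : Int, 0 ≤ x → x < n →
      PySem.List.pyGetD (l.foldl pvStepA (vis, susp, st)).1 x true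
        = PySem.Set.contains (l.foldl pvStepA (vis, susp, st)).2.1 x) ∧
    (∀ x ∈ (l.foldl pvStepA (vis, susp, st)).2.1, 0 ≤ x ∧ x < n) ∧
    (∀ x ∈ (l.foldl pvStepA (vis, susp, st)).2.2, 0 ≤ x ∧ x < n) := by
  induction l with
  | nil =>
      intro vis susp st _ hlen hinv hb hs
      exact ⟨rfl, rfl, hlen, hinv, hb, hs⟩
  | cons v rest ih =>
      intro vis susp st hl hlen hinv hb hs
      have hv := hl v List.mem_cons_self
      have hl' : ∀ w ∈ rest, 0 ≤ w ∧ w < n := fun w hw => hl w (List.mem_cons_of_mem _ hw)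
      simp only [List.foldl_cons]
      have hguard : PySem.List.pyGetD vis v true = PySem.Set.contains susp v := hinv v hv.1 hv.2
      by_cases hc : PySem.Set.contains susp v = true
      · have hA : pvStepA (vis, susp, st) v = (vis, susp, st) := by
          unfold pvStepA
          rw [if_neg (by rw [hguard, hc]; simp)]
        have hB : pvPushB (susp, st) v = (susp, st) := by
          unfold pvPushB
          rw [if_pos hc]
        rw [hA, hB]
        exact ih vis susp st hl' hlen hinv hb hs
      · have hcf : PySem.Set.contains susp v = false := by
          cases h2 : PySem.Set.contains susp v
          · rfl
          · exact absurd h2 hc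
        have hA : pvStepA (vis, susp, st) v
            = (PySem.List.pySetD vis v true, PySem.Set.add susp v, v :: st) := by
          unfold pvStepA
          rw [if_pos (by rw [hguard]; exact hcf)]
        have hB : pvPushB (susp, st) v = (PySem.Set.add susp v, v :: st) := by
          unfold pvPushB
          rw [if_neg (by rw [hcf]; simp)]
        rw [hA, hB]
        have h1 : ((v.toNat : Nat) : Int) = v := Int.toNat_of_nonneg hv.1
        apply ih
        · exact hl'
        · rw [PySem.List.length_pySetD]; exact hlen
        · intro x hx hx2
          have h2 : ((x.toNat : Nat) : Int) = x := Int.toNat_of_nonneg hx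
          rw [← h1, ← h2, PySem.List.pyGetD_pySetD_natCast vis v.toNat x.toNat _ _ (by omega),
            h1, h2, contains_add_eq susp v x hcf]
          by_cases hxv : x = v
          · rw [if_pos (by omega), show (x == v) = true from by simp [hxv]]
            simp
          · rw [if_neg (by omega), show (x == v) = false from by simp [hxv]]
            rw [Bool.or_false]
            exact hinv x hx hx2
        · intro x hx
          rcases (PySem.Set.mem_add susp v x).mp hx with h | rfl
          · exact hb x h
          · exact hv
        · intro x hx
          rcases List.mem_cons.mp hx with rfl | h
          · exact hv
          · exact hs x h

-- the two reachability walks agree (and stay inside [0, n))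
theorem dfs_agree (n : Int) (adjA : List (List Int))
    (Hbnd : ∀ u : Int, 0 ≤ u → u < n → ∀ v ∈ PySem.List.pyGetD adjA u [], 0 ≤ v ∧ v < n) :
    ∀ (vis : List Bool) (susp : PySem.Set Int) (stack : List Int),
    vis.length = n.toNat →
    (∀ x : Int, 0 ≤ x → x < n → PySem.List.pyGetD vis x true = PySem.Set.contains susp x) →
    (∀ x ∈ susp, 0 ≤ x ∧ x < n) →
    (∀ x ∈ stack, 0 ≤ x ∧ x < n) →
    (pvDfsA adjA vis susp stack).2 = pvDfsB adjA susp stack ∧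
    (∀ x ∈ (pvDfsA adjA vis susp stack).2, 0 ≤ x ∧ x < n) := by
  intro vis susp stack
  induction vis, susp, stack using pvDfsA.induct (adj := adjA) with
  | case1 vis susp =>
      intro _ _ hb _
      rw [pvDfsA, pvDfsB]
      exact ⟨rfl, hb⟩
  | case2 vis susp u st ih =>
      intro hlen hinv hb hs
      have hu := hs u List.mem_cons_self
      have hst : ∀ x ∈ st, 0 ≤ x ∧ x < n := fun x hx => hs x (List.mem_cons_of_mem _ hx)
      have hfold := fold_agree n (PySem.List.pyGetD adjA u []) vis susp st
        (Hbnd u hu.1 hu.2) hlen hinv hb hst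
      obtain ⟨he1, he2, hlen', hinv', hb', hs'⟩ := hfold
      rw [pvDfsA, pvDfsB, ← he1, ← he2]
      exact ih hlen' hinv' hb' hs'

-- the two removability tests compute the same boolean
theorem remove_iff (n : Int) (inv : List (List Int)) (revA : List (List Int)) (susp : PySem.Set Int)
    (hrows : ∀ p ∈ inv, ∃ a b : Int, p = [a, b] ∧ 0 ≤ a ∧ a < n ∧ 0 ≤ b ∧ b < n)
    (hrow : ∀ s : Int, 0 ≤ s → s < n → PySem.List.pyGetD revA s [] = inv.filterMap (pvInOf s))
    (hsb : ∀ x ∈ susp, 0 ≤ x ∧ x < n) :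
    susp.all (fun s => (PySem.List.pyGetD revA s []).all (fun c => PySem.Set.contains susp c))
      = inv.all (fun p => match p with
          | [a, b] => !PySem.Set.contains susp b || PySem.Set.contains susp a
          | _ => true) := by
  have hiff :
      (susp.all (fun s => (PySem.List.pyGetD revA s []).all (fun c => PySem.Set.contains susp c)) = true)
        ↔ (inv.all (fun p => match p with
            | [a, b] => !PySem.Set.contains susp b || PySem.Set.contains susp a
            | _ => true) = true) := by
    rw [List.all_eq_true, List.all_eq_true]
    constructor
    · intro hA p hp
      obtain ⟨a, b, rfl, ha, ha2, hb, hb2⟩ := hrows p hp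
      show (!PySem.Set.contains susp b || PySem.Set.contains susp a) = true
      by_cases hcb : PySem.Set.contains susp b = true
      · have hbmem : b ∈ susp := List.contains_iff_mem.mp hcb
        have hmem : a ∈ PySem.List.pyGetD revA b [] := by
          rw [hrow b hb hb2]
          exact List.mem_filterMap.mpr ⟨[a, b], hp, by simp [pvInOf]⟩
        have := List.all_eq_true.mp (hA b hbmem) a hmem
        rw [this]
        simp
      · have : PySem.Set.contains susp b = false := by
          cases h2 : PySem.Set.contains susp b
          · rfl
          · exact absurd h2 hcb
        rw [this]
        simp
    · intro hB s hs
      rw [List.all_eq_true]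
      intro c hc
      rw [hrow s (hsb s hs).1 (hsb s hs).2] at hc
      obtain ⟨p, hp, hpc⟩ := List.mem_filterMap.mp hc
      obtain ⟨a, b, rfl, ha, ha2, hb, hb2⟩ := hrows p hp
      have hbs : b = s ∧ a = c := by
        simp only [pvInOf] at hpc
        by_cases h : b = s
        · rw [if_pos h] at hpc
          exact ⟨h, Option.some_injective _ hpc⟩
        · rw [if_neg h] at hpc
          cases hpc
      obtain ⟨rfl, rfl⟩ := hbs
      have := hB _ hp
      have hcs : PySem.Set.contains susp b = true := List.contains_iff_mem.mpr hs
      revert this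
      show (!PySem.Set.contains susp b || PySem.Set.contains susp a) = true → _
      rw [hcs]
      simp
  cases hA : susp.all (fun s => (PySem.List.pyGetD revA s []).all (fun c => PySem.Set.contains susp c)) with
  | true => exact (hiff.mp hA).symm
  | false =>
      cases hB : inv.all (fun p => match p with
          | [a, b] => !PySem.Set.contains susp b || PySem.Set.contains susp a
          | _ => true) with
      | true => rw [hiff.mpr hB] at hA; cases hA
      | false => rfl

-- an already strictly increasing list is its own Python sort
theorem sorted_self (res : List Int) (h : res.Pairwise (· < ·)) :
    PySem.List.sorted res (fun x => x) = res :=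
  PySem.List.sorted_eq_of_perm_of_pairwise_lt res res _ (List.Perm.refl res) h

theorem AB_eq (n : Int) (k : Int) (inv : List (List Int))
    (hk0 : 0 ≤ k) (hkn : k < n)
    (hrows : ∀ p ∈ inv, ∃ a b : Int, p = [a, b] ∧ 0 ≤ a ∧ a < n ∧ 0 ≤ b ∧ b < n) :
    remainingMethods n k inv = remainingMethods_alt n k inv := by
  have hn : 0 < n := by omega
  have hNcast : ((n.toNat : Nat) : Int) = n := Int.toNat_of_nonneg (le_of_lt hn)
  simp only [remainingMethods, remainingMethods_alt]
  rw [PySem.List.foldl_prod_mk pvStepAdj pvStepRev]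
  -- the initial table
  have hInitLen : ((PySem.List.pyRange 0 n 1).map (fun _ => ([] : List Int))).length = n.toNat := by
    rw [List.length_map, PySem.List.length_pyRange_one]
    omega
  have hInitRow : ∀ i : Int, 0 ≤ i → i < n →
      PySem.List.pyGetD ((PySem.List.pyRange 0 n 1).map (fun _ => ([] : List Int))) i [] = [] :=
    fun i h1 h2 => PySem.List.pyGetD_map_pyRange_of_nonneg _ n i [] h1 h2
  -- rows of the three built adjacency structures
  have hValid : ∀ p ∈ inv, ∃ a b : Int, p = [a, b] ∧ 0 ≤ a ∧
      a < ((((PySem.List.pyRange 0 n 1).map (fun _ => ([] : List Int))).length : Nat) : Int) := by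
    intro p hp
    obtain ⟨a, b, rfl, ha, ha2, hb, hb2⟩ := hrows p hp
    exact ⟨a, b, rfl, ha, by rw [hInitLen, hNcast]; exact ha2⟩
  have hValidR : ∀ p ∈ inv, ∃ a b : Int, p = [a, b] ∧ 0 ≤ b ∧
      b < ((((PySem.List.pyRange 0 n 1).map (fun _ => ([] : List Int))).length : Nat) : Int) := by
    intro p hp
    obtain ⟨a, b, rfl, ha, ha2, hb, hb2⟩ := hrows p hp
    exact ⟨a, b, rfl, hb, by rw [hInitLen, hNcast]; exact hb2⟩
  have hRowA : ∀ u : Int, 0 ≤ u → u < n →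
      PySem.List.pyGetD (inv.foldl pvStepAdj ((PySem.List.pyRange 0 n 1).map (fun _ => ([] : List Int)))) u []
        = inv.filterMap (pvOutOf u) := by
    intro u h1 h2
    rw [rowA inv _ hValid u h1 (by rw [hInitLen, hNcast]; exact h2), hInitRow u h1 h2]
    simp
  have hRowRev : ∀ u : Int, 0 ≤ u → u < n →
      PySem.List.pyGetD (inv.foldl pvStepRev ((PySem.List.pyRange 0 n 1).map (fun _ => ([] : List Int)))) u []
        = inv.filterMap (pvInOf u) := by
    intro u h1 h2
    rw [rowRev inv _ hValidR u h1 (by rw [hInitLen, hNcast]; exact h2), hInitRow u h1 h2]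
    simp
  have hStepEq : pvStepB = pvStepAdj := by
    funext tbl p
    unfold pvStepB pvStepAdj
    rfl
  rw [hStepEq]
  have Hbnd : ∀ u : Int, 0 ≤ u → u < n →
      ∀ v ∈ PySem.List.pyGetD (inv.foldl pvStepAdj ((PySem.List.pyRange 0 n 1).map (fun _ => ([] : List Int)))) u [],
        0 ≤ v ∧ v < n := by
    intro u h1 h2 v hv
    rw [hRowA u h1 h2] at hv
    obtain ⟨p, hp, hpv⟩ := List.mem_filterMap.mp hv
    obtain ⟨a, b, rfl, ha, ha2, hb, hb2⟩ := hrows p hp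
    have hbv : b = v := by
      simp only [pvOutOf] at hpv
      by_cases h : a = u
      · rw [if_pos h] at hpv
        exact Option.some_injective _ hpv
      · rw [if_neg h] at hpv
        cases hpv
    exact hbv ▸ ⟨hb, hb2⟩
  -- the initial walk state
  have hVisLen : (PySem.List.pySetD (List.replicate n.toNat false) k true).length = n.toNat := by
    rw [PySem.List.length_pySetD, List.length_replicate]
  have hs0 : PySem.Set.add PySem.Set.empty k = [k] := rfl
  have hInv1 : ∀ x : Int, 0 ≤ x → x < n →
      PySem.List.pyGetD (PySem.List.pySetD (List.replicate n.toNat false) k true) x true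
        = PySem.Set.contains (PySem.Set.add PySem.Set.empty k) x := by
    intro x hx hx2
    have h1 : ((k.toNat : Nat) : Int) = k := Int.toNat_of_nonneg hk0
    have h2 : ((x.toNat : Nat) : Int) = x := Int.toNat_of_nonneg hx
    rw [← h1, ← h2, PySem.List.pyGetD_pySetD_natCast (List.replicate n.toNat false) k.toNat x.toNat
      _ _ (by rw [List.length_replicate]; omega), h1, h2, hs0]
    have hrep : PySem.List.pyGetD (List.replicate n.toNat false) x true = false := by
      rw [← h2, PySem.List.pyGetD_of_nonneg _ _ (by positivity)]
      rw [List.getD_eq_getElem?_getD]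
      rw [List.getElem?_replicate]
      rw [if_pos (by omega)]
      rfl
    by_cases hxk : x = k
    · rw [if_pos (by omega)]
      have : PySem.Set.contains [k] x = true := List.contains_iff_mem.mpr (by simp [hxk])
      rw [this]
    · rw [if_neg (by omega), hrep]
      have : PySem.Set.contains [k] x = false := by
        cases hcc : PySem.Set.contains [k] x
        · rfl
        · exact absurd (by simpa using List.contains_iff_mem.mp hcc) hxk
      rw [this]
  have hdfs := dfs_agree n _ Hbnd
    (PySem.List.pySetD (List.replicate n.toNat false) k true)
    (PySem.Set.add PySem.Set.empty k) [k]
    hVisLen hInv1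
    (by intro x hx; rw [hs0] at hx; rcases List.mem_singleton.mp hx with rfl; exact ⟨hk0, hkn⟩)
    (by intro x hx; rcases List.mem_singleton.mp hx with rfl; exact ⟨hk0, hkn⟩)
  obtain ⟨heq, hbnd2⟩ := hdfs
  rw [heq] at hbnd2
  rw [heq]
  rw [remove_iff n inv _ _ hrows hRowRev hbnd2]
  apply sorted_self
  split
  · exact (PySem.List.pairwise_lt_pyRange_one 0 n).filter _
  · exact PySem.List.pairwise_lt_pyRange_one 0 n

-- ===== VERDICT (by name: the statement is the Claim_ definition above) =====
theorem remainingMethods_spec : Claim_equal_remainingMethods := by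
  intro n k inv _ hpre
  obtain ⟨⟨hk0, hkn⟩, hrows0⟩ := hpre
  have hrows : ∀ p ∈ inv, ∃ a b : Int, p = [a, b] ∧ 0 ≤ a ∧ a < n ∧ 0 ≤ b ∧ b < n := by
    intro p hp
    obtain ⟨hl2, hbnd⟩ := hrows0 p hp
    obtain ⟨a, b, rfl⟩ := pair_shape p hl2
    exact ⟨a, b, rfl, (hbnd a (by simp)).1, (hbnd a (by simp)).2,
      (hbnd b (by simp)).1, (hbnd b (by simp)).2⟩
  show remainingMethods n k inv = remainingMethods_alt n k inv
  exact AB_eq n k inv hk0 hkn hrows
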